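-- pv_equiv track=rewrite | github.com/chrislattman/HackerRank | InterviewPreparationKit/TripleSum.py | triplets
-- ===== SOURCE A (Python) =====
-- def triplets(a, b, c):
--     a.sort()
--     b.sort()
--     c.sort()
--
--     a_set = []
--     b_set = []
--     c_set = []
--     a_set.append(a[0])
--     b_set.append(b[0])
--     c_set.append(c[0])
--
--     for i in range(1, len(a)):
--         if a[i] != a[i - 1]:
--             a_set.append(a[i])
--
--     for j in range(1, len(b)):
--         if b[j] != b[j - 1]:
--             b_set.append(b[j])
--
--     for k in range(1, len(c)):
--         if c[k] != c[k - 1]: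
--             c_set.append(c[k])
--
--     a_size = len(a_set)
--     b_size = len(b_set)
--     c_size = len(c_set)
--
--     triplets = 0
--     a_index = 0
--     c_index = 0
--     for m in range(b_size):
--         while a_index < a_size and a_set[a_index] <= b_set[m]:
--             a_index += 1
--
--         while c_index < c_size and c_set[c_index] <= b_set[m]:
--             c_index += 1
--
--         triplets += a_index * c_index
--
--     return triplets
-- ===== SOURCE B (Python) =====
-- def _bisect_right(xs, v):
--     lo, hi = 0, len(xs)
--     while lo < hi:
--         mid = (lo + hi) // 2
--         if xs[mid] <= v:
--             lo = mid + 1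
--         else:
--             hi = mid
--     return lo
--
--
-- def triplets(a, b, c):
--     a.sort()
--     b.sort()
--     c.sort()
--     a_s = sorted(set(a))
--     b_s = sorted(set(b))
--     c_s = sorted(set(c))
--     total = 0
--     for v in b_s:
--         total += _bisect_right(a_s, v) * _bisect_right(c_s, v)
--     return total
-- ===== Notes on version B (the rewrite author's own statement) =====
-- stated objective: alternative
-- what changed: Deduplication via sorted(set(...)) replaces the index-based adjacent-compare loops, and the stateful two-pointer monotonic sweep is replaced by an independent binary-search count (hand-written bisect_right) per distinct b-value.
import Mathlib
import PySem

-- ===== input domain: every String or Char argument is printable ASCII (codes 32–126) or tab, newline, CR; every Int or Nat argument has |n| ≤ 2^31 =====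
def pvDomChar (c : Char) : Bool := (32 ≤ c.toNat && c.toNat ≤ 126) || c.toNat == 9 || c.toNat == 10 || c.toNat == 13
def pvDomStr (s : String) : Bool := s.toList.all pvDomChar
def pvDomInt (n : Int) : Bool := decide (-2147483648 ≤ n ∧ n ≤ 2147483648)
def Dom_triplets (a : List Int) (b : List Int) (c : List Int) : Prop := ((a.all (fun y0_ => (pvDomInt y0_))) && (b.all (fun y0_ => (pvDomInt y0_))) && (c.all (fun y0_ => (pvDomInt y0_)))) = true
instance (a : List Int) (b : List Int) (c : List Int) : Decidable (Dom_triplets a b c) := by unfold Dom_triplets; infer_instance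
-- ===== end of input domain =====

-- B replaces A's index-based adjacent-compare dedup loops by sorted(set(..)) and A's stateful
-- two-pointer sweep by a hand-written binary search per distinct b-value (objective: alternative).
-- Both A and B sort the argument lists in place; the equivalence proved is about the return value.


-- ===== PORT A =====
-- a_set = [s[0]]; for i in range(1, len(s)): if s[i] != s[i-1]: a_set.append(s[i])
-- (s[0] is pyGetD s 0 0: in range on every input Pre_ admits, where s is nonempty)
def pyDedupA (s : List Int) : List Int :=
  (PySem.List.pyRange 1 s.length 1).foldl
    (fun acc i =>
      if PySem.List.pyGetD s i 0 ≠ PySem.List.pyGetD s (i - 1) 0 then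
        acc ++ [PySem.List.pyGetD s i 0]
      else acc)
    [PySem.List.pyGetD s 0 0]

-- while idx < size and s[idx] <= v: idx += 1
-- (fuel = s.length - i bounds the iteration count exactly; when fuel is 0 the guard is false too)
def pyAdvanceF (s : List Int) (v : Int) : Nat → Nat → Nat
  | 0, i => i
  | f + 1, i =>
    if h : i < s.length then
      (if s[i] ≤ v then pyAdvanceF s v f (i + 1) else i)
    else i

def pyAdvance (s : List Int) (v : Int) (i : Nat) : Nat :=
  pyAdvanceF s v (s.length - i) i

def triplets (a : List Int) (b : List Int) (c : List Int) : Int :=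
  let aSet := pyDedupA (PySem.List.sorted a (fun x => x))
  let bSet := pyDedupA (PySem.List.sorted b (fun x => x))
  let cSet := pyDedupA (PySem.List.sorted c (fun x => x))
  -- triplets = 0; a_index = 0; c_index = 0; for m in range(b_size): ... triplets += a_index * c_index
  (bSet.foldl
    (fun (st : Int × Nat × Nat) v =>
      let ai := pyAdvance aSet v st.2.1
      let ci := pyAdvance cSet v st.2.2
      (st.1 + (ai : Int) * (ci : Int), ai, ci))
    (0, 0, 0)).1

-- ===== PORT B =====
-- hand-written bisect_right: lo, hi = 0, len(xs); while lo < hi: mid = (lo+hi)//2; ...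
-- (fuel = hi - lo bounds the iteration count exactly; when fuel is 0 the guard is false too)
def bsrF (xs : List Int) (v : Int) : Nat → Nat → Nat → Nat
  | 0, lo, _ => lo
  | f + 1, lo, hi =>
    if lo < hi then
      let mid := (lo + hi) / 2
      if xs.getD mid 0 ≤ v then bsrF xs v f (mid + 1) hi else bsrF xs v f lo mid
    else lo

def bsr (xs : List Int) (v : Int) (lo hi : Nat) : Nat :=
  bsrF xs v (hi - lo) lo hi

def triplets_alt (a : List Int) (b : List Int) (c : List Int) : Int :=
  let aS := PySem.List.sorted (PySem.Set.ofList a) (fun x => x)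
  let bS := PySem.List.sorted (PySem.Set.ofList b) (fun x => x)
  let cS := PySem.List.sorted (PySem.Set.ofList c) (fun x => x)
  bS.foldl (fun t v => t + (bsr aS v 0 aS.length : Int) * (bsr cS v 0 cS.length : Int)) 0

-- ===== PRECONDITION & SPEC =====
-- A evaluates a[0], b[0], c[0]: it raises IndexError iff one of the lists is empty.
def Pre_triplets (a : List Int) (b : List Int) (c : List Int) : Prop :=
  a ≠ [] ∧ b ≠ [] ∧ c ≠ []
instance (a : List Int) (b : List Int) (c : List Int) : Decidable (Pre_triplets a b c) := by
  unfold Pre_triplets; infer_instance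

def pvWitness_triplets : List Int × List Int × List Int := ([1, 3, 5], [2, 3], [1, 2, 3])

def Spec_triplets (a : List Int) (b : List Int) (c : List Int) (out : Int) : Prop := out = triplets_alt a b c
instance (a : List Int) (b : List Int) (c : List Int) (out : Int) : Decidable (Spec_triplets a b c out) := by unfold Spec_triplets; infer_instance

-- ===== CLAIM (what is proved, stated in full; the proofs are below) =====
def Claim_equal_triplets : Prop := ∀ (a : List Int) (b : List Int) (c : List Int), Dom_triplets a b c → Pre_triplets a b c → Spec_triplets a b c (triplets a b c)

-- ===== LEMMAS AND PROOFS =====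

-- proof-side structural form of A's dedup loop
def cd (p : Int) : List Int → List Int
  | [] => []
  | x :: xs => (if x ≠ p then [x] else []) ++ cd x xs

theorem cd_eq_of_eq (y : Int) (ys : List Int) : cd y (y :: ys) = cd y ys := by
  simp [cd]

theorem cd_eq_of_ne (p y : Int) (ys : List Int) (h : y ≠ p) : cd p (y :: ys) = y :: cd y ys := by
  simp [cd, h]

theorem cd_fold (t : List Int) : ∀ (p : Int) (acc : List Int),
    ((p :: t).zip t).foldl
      (fun acc pr => if pr.2 ≠ pr.1 then acc ++ [pr.2] else acc) acc
      = acc ++ cd p t := by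
  induction t with
  | nil => intro p acc; simp [cd]
  | cons x xs ih =>
    intro p acc
    simp only [List.zip_cons_cons, List.foldl_cons]
    by_cases hxp : x ≠ p
    · rw [cd_eq_of_ne p x xs hxp]
      rw [if_pos hxp]
      rw [ih x (acc ++ [x])]
      simp
    · simp only [ne_eq, not_not] at hxp
      subst hxp
      rw [cd_eq_of_eq]
      rw [if_neg (by simp)]
      exact ih x acc

theorem dedupA_eq_cons_cd (h : Int) (t : List Int) :
    pyDedupA (h :: t) = h :: cd h t := by
  unfold pyDedupA
  have hmap : (PySem.List.pyRange 1 (h :: t).length 1).map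
      (fun i => (PySem.List.pyGetD (h :: t) (i - 1) 0, PySem.List.pyGetD (h :: t) i 0))
      = (h :: t).zip t := by
    apply List.ext_getElem
    · simp [PySem.List.length_pyRange_one]
    · intro k h1 h2
      have hk : k < t.length := by
        simp only [List.length_zip, List.length_cons] at h2
        omega
      rw [List.getElem_map, PySem.List.getElem_pyRange_one _ _ _ (by
        simpa [PySem.List.length_pyRange_one] using hk), List.getElem_zip]
      have e1 : (1 : Int) + (k : Int) - 1 = ((k : Nat) : Int) := by omega
      have e2 : (1 : Int) + (k : Int) = (((k + 1 : Nat)) : Int) := by omega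
      rw [e1, e2, PySem.List.pyGetD_natCast, PySem.List.pyGetD_natCast]
      have ha' : k < (h :: t).length := by simp; omega
      have hb' : k + 1 < (h :: t).length := by simp; omega
      rw [List.getD_eq_getElem _ _ ha', List.getD_eq_getElem _ _ hb']
      simp
  have hseed : PySem.List.pyGetD (h :: t) 0 0 = h := by
    simp [pysem]
  calc (PySem.List.pyRange 1 (h :: t).length 1).foldl
        (fun acc i =>
          if PySem.List.pyGetD (h :: t) i 0 ≠ PySem.List.pyGetD (h :: t) (i - 1) 0 then
            acc ++ [PySem.List.pyGetD (h :: t) i 0]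
          else acc)
        [PySem.List.pyGetD (h :: t) 0 0]
      = ((h :: t).zip t).foldl
          (fun acc pr => if pr.2 ≠ pr.1 then acc ++ [pr.2] else acc) [h] := by
        rw [hseed, ← hmap, List.foldl_map]
    _ = [h] ++ cd h t := cd_fold t h [h]
    _ = h :: cd h t := by simp

theorem mem_cd (t : List Int) : ∀ (p x : Int), x ∈ p :: cd p t ↔ x ∈ p :: t := by
  induction t with
  | nil => simp [cd]
  | cons y ys ih =>
    intro p x
    by_cases h : y = p
    · subst h
      rw [cd_eq_of_eq]
      have ih' := ih y x
      simp only [List.mem_cons] at ih' ⊢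
      tauto
    · rw [cd_eq_of_ne p y ys h]
      have ih' := ih y x
      simp only [List.mem_cons] at ih' ⊢
      tauto

theorem pairwise_cd (t : List Int) : ∀ (p : Int), (p :: t).Pairwise (· ≤ ·) →
    (p :: cd p t).Pairwise (· < ·) := by
  induction t with
  | nil => intro p _; simp [cd]
  | cons y ys ih =>
    intro p hp
    rw [List.pairwise_cons] at hp
    obtain ⟨hple, hys⟩ := hp
    by_cases h : y = p
    · subst h
      rw [cd_eq_of_eq]
      apply ih y
      rw [List.pairwise_cons] at hys ⊢
      exact ⟨hys.1, hys.2⟩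
    · have hpy : p < y := lt_of_le_of_ne (hple y (by simp)) (Ne.symm h)
      rw [cd_eq_of_ne p y ys h]
      have hrec := ih y hys
      rw [List.pairwise_cons]
      refine ⟨?_, hrec⟩
      intro z hz
      rcases List.mem_cons.mp hz with hz | hz
      · exact hz ▸ hpy
      · rw [List.pairwise_cons] at hrec
        exact lt_trans hpy (hrec.1 z hz)

-- A's dedup of the sorted list IS B's sorted(set(..))
theorem dedupA_sorted_eq (a : List Int) (ha : a ≠ []) :
    pyDedupA (PySem.List.sorted a (fun x => x))
      = PySem.List.sorted (PySem.Set.ofList a) (fun x => x) := by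
  have hne : PySem.List.sorted a (fun x => x) ≠ [] := by
    intro h
    exact ha ((PySem.List.sorted_eq_nil_iff a (fun x => x) false).mp h)
  obtain ⟨h, t, hst⟩ := List.exists_cons_of_ne_nil hne
  rw [hst, dedupA_eq_cons_cd]
  have hpw : (h :: t).Pairwise (· ≤ ·) := by
    have := PySem.List.sorted_pairwise a (fun x => x)
    rw [hst] at this
    exact this
  have hlt : (h :: cd h t).Pairwise (· < ·) := pairwise_cd t h hpw
  have hnd : (h :: cd h t).Nodup := hlt.imp (fun hab => ne_of_lt hab)
  have hmem : ∀ x, x ∈ h :: cd h t ↔ x ∈ (PySem.Set.ofList a : List Int) := by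
    intro x
    rw [PySem.Set.mem_ofList, mem_cd t h x, ← hst, PySem.List.mem_sorted]
  have hperm : (h :: cd h t).Perm (PySem.Set.ofList a : List Int) :=
    (List.perm_ext_iff_of_nodup hnd (PySem.Set.nodup_ofList a)).mpr hmem
  exact (PySem.List.sorted_eq_of_perm_of_pairwise_lt _ _ _ hperm hlt).symm

theorem bisect_mono (L : List Int) (hL : L.Pairwise (· ≤ ·)) {v w : Int} (hvw : v ≤ w) :
    PySem.List.bisectRight L v ≤ PySem.List.bisectRight L w := by
  by_contra hcon
  simp only [not_le] at hcon
  obtain ⟨hle1, hbig1, hsmall1⟩ := PySem.List.bisectRight_spec L v hL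
  obtain ⟨hle2, hbig2, hsmall2⟩ := PySem.List.bisectRight_spec L w hL
  have hlt : PySem.List.bisectRight L w < L.length := lt_of_lt_of_le hcon hle1
  have h1 := hbig1 (PySem.List.bisectRight L w) hlt hcon
  have h2 := hsmall2 (PySem.List.bisectRight L w) hlt le_rfl
  linarith

theorem pyAdvance_eq (L : List Int) (hL : L.Pairwise (· ≤ ·)) (v : Int) :
    ∀ fuel i : Nat, L.length - i ≤ fuel → i ≤ PySem.List.bisectRight L v →
      pyAdvanceF L v fuel i = PySem.List.bisectRight L v := by
  obtain ⟨hle, hbig, hsmall⟩ := PySem.List.bisectRight_spec L v hL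
  intro fuel
  induction fuel with
  | zero => intro i hf hi; simp only [pyAdvanceF]; omega
  | succ f ih =>
    intro i hf hi
    simp only [pyAdvanceF]
    split
    · next hlen =>
      split
      · next hval =>
        have hlt : i < PySem.List.bisectRight L v := by
          rcases Nat.lt_or_ge i (PySem.List.bisectRight L v) with h | h
          · exact h
          · exact absurd (hsmall i hlen h) (by linarith)
        exact ih (i + 1) (by omega) hlt
      · next hval =>
        rcases Nat.lt_or_ge i (PySem.List.bisectRight L v) with h | h
        · exact absurd (hbig i hlen h) hval
        · omega
    · next hlen => omega

theorem bsr_eq (L : List Int) (hL : L.Pairwise (· ≤ ·)) (v : Int) :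
    ∀ fuel lo hi : Nat, hi - lo ≤ fuel → lo ≤ PySem.List.bisectRight L v →
      PySem.List.bisectRight L v ≤ hi → hi ≤ L.length →
      bsrF L v fuel lo hi = PySem.List.bisectRight L v := by
  obtain ⟨hle, hbig, hsmall⟩ := PySem.List.bisectRight_spec L v hL
  intro fuel
  induction fuel with
  | zero => intro lo hi hf hlo hhi hlen; simp only [bsrF]; omega
  | succ f ih =>
    intro lo hi hf hlo hhi hlen
    simp only [bsrF]
    split
    · next hlh =>
      have hmid1 : lo ≤ (lo + hi) / 2 := by omega
      have hmid2 : (lo + hi) / 2 < hi := by omega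
      have hmlen : (lo + hi) / 2 < L.length := by omega
      rw [List.getD_eq_getElem L 0 hmlen]
      split
      · next hval =>
        have hlt : (lo + hi) / 2 < PySem.List.bisectRight L v := by
          rcases Nat.lt_or_ge ((lo + hi) / 2) (PySem.List.bisectRight L v) with h | h
          · exact h
          · exact absurd (hsmall _ hmlen h) (by linarith)
        exact ih ((lo + hi) / 2 + 1) hi (by omega) hlt hhi hlen
      · next hval =>
        have hge : PySem.List.bisectRight L v ≤ (lo + hi) / 2 := by
          rcases Nat.lt_or_ge ((lo + hi) / 2) (PySem.List.bisectRight L v) with h | h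
          · exact absurd (hbig _ hmlen h) hval
          · exact h
        exact ih lo ((lo + hi) / 2) (by omega) hlo hge (by omega)
    · next hlh => omega

theorem sweep_eq (La Lc : List Int) (hLa : La.Pairwise (· ≤ ·)) (hLc : Lc.Pairwise (· ≤ ·)) :
    ∀ (bS : List Int), bS.Pairwise (· ≤ ·) →
    ∀ (t : Int) (ai ci : Nat),
      (∀ v ∈ bS, ai ≤ PySem.List.bisectRight La v) →
      (∀ v ∈ bS, ci ≤ PySem.List.bisectRight Lc v) →
      (bS.foldl
        (fun (st : Int × Nat × Nat) v =>
          let ai := pyAdvance La v st.2.1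
          let ci := pyAdvance Lc v st.2.2
          (st.1 + (ai : Int) * (ci : Int), ai, ci))
        (t, ai, ci)).1
      = bS.foldl (fun t v => t + (bsr La v 0 La.length : Int) * (bsr Lc v 0 Lc.length : Int)) t := by
  intro bS
  induction bS with
  | nil => intro _ t ai ci _ _; rfl
  | cons v rest ih =>
    intro hbs t ai ci hA hC
    rw [List.pairwise_cons] at hbs
    obtain ⟨hv, hrest⟩ := hbs
    have hKa := PySem.List.bisectRight_spec La v hLa
    have hKc := PySem.List.bisectRight_spec Lc v hLc
    have ea : pyAdvance La v ai = PySem.List.bisectRight La v := by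
      unfold pyAdvance
      exact pyAdvance_eq La hLa v _ ai le_rfl (hA v (by simp))
    have ec : pyAdvance Lc v ci = PySem.List.bisectRight Lc v := by
      unfold pyAdvance
      exact pyAdvance_eq Lc hLc v _ ci le_rfl (hC v (by simp))
    have ba : bsr La v 0 La.length = PySem.List.bisectRight La v := by
      unfold bsr
      exact bsr_eq La hLa v _ 0 La.length le_rfl (Nat.zero_le _) hKa.1 le_rfl
    have bc : bsr Lc v 0 Lc.length = PySem.List.bisectRight Lc v := by
      unfold bsr
      exact bsr_eq Lc hLc v _ 0 Lc.length le_rfl (Nat.zero_le _) hKc.1 le_rfl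
    simp only [List.foldl_cons, ea, ec, ba, bc]
    exact ih hrest _ _ _
      (fun w hw => bisect_mono La hLa (hv w hw))
      (fun w hw => bisect_mono Lc hLc (hv w hw))

-- ===== VERDICT (by name: the statement is the Claim_ definition above) =====
theorem triplets_spec : Claim_equal_triplets := by
  intro a b c _ hpre
  obtain ⟨ha, hb, hc⟩ := hpre
  unfold Spec_triplets triplets triplets_alt
  simp only [dedupA_sorted_eq a ha, dedupA_sorted_eq b hb, dedupA_sorted_eq c hc]
  exact sweep_eq _ _
    ((PySem.List.sorted_ofList_pairwise_lt a).imp le_of_lt)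
    ((PySem.List.sorted_ofList_pairwise_lt c).imp le_of_lt)
    _ ((PySem.List.sorted_ofList_pairwise_lt b).imp le_of_lt)
    0 0 0 (fun _ _ => Nat.zero_le _) (fun _ _ => Nat.zero_le _)
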